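-- pv_equiv track=rewrite | github.com/njbrake/porchsongs | backend/app/services/llm_service.py | _parse_meta_section
-- ===== SOURCE A (Python) =====
-- def _parse_meta_section(meta_text: str) -> dict[str, str | None]:
--     """Parse title/artist from a meta section. UNKNOWN maps to None."""
--     title: str | None = None
--     artist: str | None = None
--     for line in meta_text.split("\n"):
--         line = line.strip()
--         if line.lower().startswith("title:"):
--             val = line.split(":", 1)[1].strip()
--             title = None if val.upper() == "UNKNOWN" else val
--         elif line.lower().startswith("artist:"):
--             val = line.split(":", 1)[1].strip()
--             artist = None if val.upper() == "UNKNOWN" else val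
--     return {"title": title, "artist": artist}
-- ===== SOURCE B (Python) =====
-- def _parse_meta_section(meta_text: str) -> dict[str, str | None]:
--     """Parse title/artist from a meta section. UNKNOWN maps to None."""
--     table = {}
--     for line in meta_text.split("\n"):
--         line = line.strip()
--         if ":" in line:
--             key, val = line.split(":", 1)
--             table[key.lower()] = val.strip()
--
--     def norm(v):
--         return None if v is not None and v.upper() == "UNKNOWN" else v
--
--     return {"title": norm(table.get("title")), "artist": norm(table.get("artist"))}
-- ===== Notes on version B (the rewrite author's own statement) =====
-- stated objective: idiomatic
-- what changed: B replaces A's per-line branchy scan with a uniform ingest of every 'key: value' line into a dict (key lowered, later lines overwrite) followed by two lookups with the UNKNOWN normalisation applied once at the end.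
import Mathlib
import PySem

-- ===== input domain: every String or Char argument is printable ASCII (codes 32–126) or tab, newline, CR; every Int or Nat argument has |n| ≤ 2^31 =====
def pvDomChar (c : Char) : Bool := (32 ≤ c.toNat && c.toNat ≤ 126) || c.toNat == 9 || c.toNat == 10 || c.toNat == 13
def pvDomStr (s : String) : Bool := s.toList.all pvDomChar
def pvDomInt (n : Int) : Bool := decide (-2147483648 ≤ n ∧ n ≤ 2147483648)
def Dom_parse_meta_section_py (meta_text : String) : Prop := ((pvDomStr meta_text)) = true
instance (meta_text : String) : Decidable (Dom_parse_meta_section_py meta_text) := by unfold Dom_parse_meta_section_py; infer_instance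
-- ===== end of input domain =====

set_option maxHeartbeats 1600000

-- B replaces A's branchy per-line scan by a uniform ingest of every "key: value" line into a dict
-- (key lowered, later lines overwrite) followed by two lookups; equivalence of return values proved below.

-- ===== PORT A =====
-- one iteration of A's for-loop over (title, artist)
def pvLineStepA (st : Option String × Option String) (raw : String) : Option String × Option String :=
  let line := PySem.Str.strip raw
  if PySem.Str.startswith (PySem.Str.lower line) "title:" then
    -- line.split(":", 1)[1]: index 1 always exists here (the line contains ':'), so getD "" is a totality guard only
    let val := PySem.Str.strip ((PySem.List.pyGet? ((PySem.Str.splitMax? line ":" 1).getD []) 1).getD "")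
    ((if PySem.Str.upper val = "UNKNOWN" then none else some val), st.2)
  else if PySem.Str.startswith (PySem.Str.lower line) "artist:" then
    let val := PySem.Str.strip ((PySem.List.pyGet? ((PySem.Str.splitMax? line ":" 1).getD []) 1).getD "")
    (st.1, (if PySem.Str.upper val = "UNKNOWN" then none else some val))
  else st

def parse_meta_section_py (meta_text : String) : List (String × Option String) :=
  let st := ((PySem.Str.split? meta_text "\n").getD []).foldl pvLineStepA (none, none)
  [("title", st.1), ("artist", st.2)]

-- ===== PORT B =====
-- UNKNOWN normalisation, applied once at the end (Source B's norm)
def pvNorm (v : Option String) : Option String :=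
  match v with
  | none => none
  | some s => if PySem.Str.upper s = "UNKNOWN" then none else some s

-- ingest one line into the table (Source B's loop body)
def pvIngest (d : PySem.Dict String String) (raw : String) : PySem.Dict String String :=
  let line := PySem.Str.strip raw
  if PySem.Str.isIn ":" line then
    -- the line contains ':', so split(":", 1) has two pieces; getD is a totality guard only
    let parts := (PySem.Str.splitMax? line ":" 1).getD []
    d.insert (PySem.Str.lower ((PySem.List.pyGet? parts 0).getD ""))
             (PySem.Str.strip ((PySem.List.pyGet? parts 1).getD ""))
  else d

def parse_meta_section_py_alt (meta_text : String) : List (String × Option String) :=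
  let d := ((PySem.Str.split? meta_text "\n").getD []).foldl pvIngest PySem.Dict.empty
  [("title", pvNorm (d.get? "title")), ("artist", pvNorm (d.get? "artist"))]

-- ===== PRECONDITION & SPEC =====
def Spec_parse_meta_section_py (meta_text : String) (out : List (String × Option String)) : Prop := out = parse_meta_section_py_alt meta_text
instance (meta_text : String) (out : List (String × Option String)) : Decidable (Spec_parse_meta_section_py meta_text out) := by unfold Spec_parse_meta_section_py; infer_instance

-- ===== CLAIM (what is proved, stated in full; the proofs are below) =====
def Claim_equal_parse_meta_section_py : Prop := ∀ (meta_text : String), Dom_parse_meta_section_py meta_text → Spec_parse_meta_section_py meta_text (parse_meta_section_py meta_text)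

-- ===== LEMMAS AND PROOFS =====

-- lowerChar maps nothing else to ':'
theorem pv_lowerChar_colon_iff (c : Char) : PySem.Chars.lowerChar c = ':' ↔ c = ':' := by
  constructor
  · intro h
    unfold PySem.Chars.lowerChar PySem.Chars.isupper at h
    split_ifs at h with hu
    · exfalso
      have hb : 'A' ≤ c ∧ c ≤ 'Z' := by simpa using hu
      have hv : (c.toNat + 32).isValidChar := by
        have : c.toNat ≤ 90 := by simpa [Char.le_def] using hb.2
        left; omega
      have h1 : 65 ≤ c.toNat := by simpa [Char.le_def] using hb.1
      have h2 := congrArg Char.toNat h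
      rw [Char.toNat_ofNat, if_pos hv] at h2
      have h3 : (':' : Char).toNat = 58 := rfl
      rw [h3] at h2
      omega
    · exact h
  · intro h; subst h; decide

-- first-colon decomposition of a list of chars
theorem pv_colon_decomp (L : List Char) (h : ':' ∈ L) :
    ∃ a b, L = a ++ ':' :: b ∧ ':' ∉ a := by
  induction L with
  | nil => cases h
  | cons c t ih =>
    by_cases hc : c = ':'
    · exact ⟨[], t, by simp [hc], by simp⟩
    · rcases ih (by cases h with | head => exact absurd rfl hc | tail _ h => exact h) with ⟨a, b, rfl, ha⟩
      refine ⟨c :: a, b, rfl, ?_⟩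
      simp only [List.mem_cons, not_or]
      exact ⟨fun h => hc h.symm, ha⟩

-- prefix "w:" of "a:..." forces w = a when neither w nor a contains ':'
theorem pv_prefix_colon_iff (w a b : List Char) (hw : ':' ∉ w) (ha : ':' ∉ a) :
    (w ++ [':']).isPrefixOf (a ++ ':' :: b) = true ↔ w = a := by
  induction w generalizing a with
  | nil =>
    cases a with
    | nil => simp [List.isPrefixOf]
    | cons c t => simp_all [List.isPrefixOf]
  | cons x w' ih =>
    cases a with
    | nil => simp_all [List.isPrefixOf, eq_comm (a := x)]
    | cons c t =>
      by_cases hx : x = c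
      · subst hx
        have := ih (a := t) (by simp_all) (by simp_all)
        simpa [List.isPrefixOf] using this
      · simp_all [List.isPrefixOf, beq_iff_eq]

-- splitOnMax.go, no colon: one piece
theorem pv_go_nocolon (fuel : Nat) : ∀ (l cur : List Char) (acc : List (List Char)) (m : Nat),
    ':' ∉ l → l.length ≤ fuel →
    PySem.Chars.splitOnMax.go [':'] fuel m l cur acc = ((cur.reverse ++ l) :: acc).reverse := by
  induction fuel with
  | zero =>
    intro l cur acc m hnc hlen
    simp [PySem.Chars.splitOnMax.go]
  | succ f ih =>
    intro l cur acc m hnc hlen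
    cases l with
    | nil => simp [PySem.Chars.splitOnMax.go]
    | cons c r =>
      have hc : c ≠ ':' := fun h => hnc (h ▸ List.mem_cons_self)
      have hr : ':' ∉ r := fun h => hnc (List.mem_cons_of_mem _ h)
      by_cases hm : m = 0
      · simp [PySem.Chars.splitOnMax.go, hm]
      · rw [show PySem.Chars.splitOnMax.go [':'] (f + 1) m (c :: r) cur acc
            = PySem.Chars.splitOnMax.go [':'] f m r (c :: cur) acc from by
          simp [PySem.Chars.splitOnMax.go, hm, List.isPrefixOf, Ne.symm hc]]
        rw [ih r (c :: cur) acc m hr (by simpa using Nat.le_of_succ_le_succ hlen)]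
        simp

-- splitOnMax.go with budget 0 finishes the current tail as one piece
theorem pv_go_m0 (fuel : Nat) (b : List Char) (acc : List (List Char)) :
    PySem.Chars.splitOnMax.go [':'] fuel 0 b [] acc = (b :: acc).reverse := by
  cases fuel with
  | zero => simp [PySem.Chars.splitOnMax.go]
  | succ f => cases b with
    | nil => simp [PySem.Chars.splitOnMax.go]
    | cons c r => simp [PySem.Chars.splitOnMax.go]

-- splitOnMax.go, colon present, budget 1
theorem pv_go_colon (fuel : Nat) : ∀ (a b cur : List Char) (acc : List (List Char)),
    ':' ∉ a → a.length < fuel →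
    PySem.Chars.splitOnMax.go [':'] fuel 1 (a ++ ':' :: b) cur acc
      = (b :: (cur.reverse ++ a) :: acc).reverse := by
  induction fuel with
  | zero => intro a b cur acc _ h; omega
  | succ f ih =>
    intro a b cur acc ha hlen
    cases a with
    | nil =>
      rw [show PySem.Chars.splitOnMax.go [':'] (f + 1) 1 ([] ++ ':' :: b) cur acc
            = PySem.Chars.splitOnMax.go [':'] f 0 b [] (cur.reverse :: acc) from by
        simp [PySem.Chars.splitOnMax.go, List.isPrefixOf]]
      rw [pv_go_m0]
      simp
    | cons c a' =>
      have hc : c ≠ ':' := fun h => ha (h ▸ List.mem_cons_self)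
      have ha' : ':' ∉ a' := fun h => ha (List.mem_cons_of_mem _ h)
      rw [show PySem.Chars.splitOnMax.go [':'] (f + 1) 1 ((c :: a') ++ ':' :: b) cur acc
            = PySem.Chars.splitOnMax.go [':'] f 1 (a' ++ ':' :: b) (c :: cur) acc from by
        simp [PySem.Chars.splitOnMax.go, List.isPrefixOf, Ne.symm hc]]
      rw [ih a' b (c :: cur) acc ha' (by simp at hlen ⊢; omega)]
      simp

theorem pv_split1_nocolon (L : List Char) (h : ':' ∉ L) :
    PySem.Chars.splitOnMax L [':'] 1 = [L] := by
  unfold PySem.Chars.splitOnMax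
  rw [if_neg (by norm_num)]
  have h1 : (1 : Int).toNat = 1 := rfl
  rw [h1, pv_go_nocolon (L.length + 1) L [] [] 1 h (by omega)]
  simp

theorem pv_split1_colon (a b : List Char) (ha : ':' ∉ a) :
    PySem.Chars.splitOnMax (a ++ ':' :: b) [':'] 1 = [a, b] := by
  unfold PySem.Chars.splitOnMax
  rw [if_neg (by norm_num)]
  have h1 : (1 : Int).toNat = 1 := rfl
  rw [h1, pv_go_colon ((a ++ ':' :: b).length + 1) a b [] [] ha (by simp)]
  simp

-- ':' ∈ lower L ↔ ':' ∈ L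
theorem pv_colon_mem_lower (L : List Char) : ':' ∈ PySem.Chars.lower L ↔ ':' ∈ L := by
  unfold PySem.Chars.lower
  constructor
  · intro h
    rcases List.mem_map.mp h with ⟨c, hc, he⟩
    exact (pv_lowerChar_colon_iff c).mp he ▸ hc
  · intro h
    exact List.mem_map.mpr ⟨':', h, by decide⟩

-- the key characterisation: A's branch test ↔ (B ingests the line under key w)
theorem pv_key_iff (L w : List Char) (hw : ':' ∉ w) :
    PySem.Chars.startswith (PySem.Chars.lower L) (w ++ [':']) = true
      ↔ ':' ∈ L ∧ PySem.Chars.lower (((PySem.Chars.splitOnMax L [':'] 1).headD []) ) = w := by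
  by_cases hc : ':' ∈ L
  · rcases pv_colon_decomp L hc with ⟨a, b, rfl, ha⟩
    rw [pv_split1_colon a b ha]
    have hla : ':' ∉ PySem.Chars.lower a := fun h => ha ((pv_colon_mem_lower a).mp h)
    have hdist : PySem.Chars.lower (a ++ ':' :: b)
        = PySem.Chars.lower a ++ ':' :: PySem.Chars.lower b := by
      simp [PySem.Chars.lower, PySem.Chars.lowerChar, PySem.Chars.isupper]
    unfold PySem.Chars.startswith
    rw [hdist]
    rw [pv_prefix_colon_iff w (PySem.Chars.lower a) (PySem.Chars.lower b) hw hla]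
    simp [hc, eq_comm]
  · rw [pv_split1_nocolon L hc]
    simp only [List.headD_cons]
    constructor
    · intro h
      exfalso
      have hpre : (w ++ [':']) <+: PySem.Chars.lower L := by
        simpa [PySem.Chars.startswith, List.isPrefixOf_iff_prefix] using h
      have : ':' ∈ PySem.Chars.lower L := hpre.subset (by simp)
      exact hc ((pv_colon_mem_lower L).mp this)
    · rintro ⟨h, -⟩; exact absurd h hc

-- per-line step preserves the invariant
theorem pv_step (st : Option String × Option String) (d : PySem.Dict String String) (raw : String)
    (h1 : st.1 = pvNorm (d.get? "title")) (h2 : st.2 = pvNorm (d.get? "artist")) :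
    (pvLineStepA st raw).1 = pvNorm ((pvIngest d raw).get? "title")
      ∧ (pvLineStepA st raw).2 = pvNorm ((pvIngest d raw).get? "artist") := by
  simp only [pvLineStepA, pvIngest]
  have hone : (PySem.Str.isIn ":" (PySem.Str.strip raw) = true) ↔ ':' ∈ (PySem.Str.strip raw).toList := by
    rw [show PySem.Str.isIn ":" (PySem.Str.strip raw) = PySem.Chars.isIn [':'] (PySem.Str.strip raw).toList from rfl]
    unfold PySem.Chars.isIn
    rw [bne_iff_ne, PySem.Chars.find_ne_neg_one_iff]
    constructor
    · intro h; exact h.subset (by simp)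
    · intro h
      rcases List.append_of_mem h with ⟨u, v, huv⟩
      exact ⟨u, v, by rw [huv]; simp⟩
  have htit : (PySem.Str.startswith (PySem.Str.lower (PySem.Str.strip raw)) "title:" = true)
      ↔ (':' ∈ (PySem.Str.strip raw).toList ∧
         PySem.Chars.lower (((PySem.Chars.splitOnMax (PySem.Str.strip raw).toList [':'] 1).headD [])) = "title".toList) := by
    rw [show PySem.Str.startswith (PySem.Str.lower (PySem.Str.strip raw)) "title:"
        = PySem.Chars.startswith (PySem.Chars.lower (PySem.Str.strip raw).toList) ("title".toList ++ [':']) from by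
      simp only [PySem.Str.startswith, PySem.Str.toList_lower]
      congr 1]
    exact pv_key_iff (PySem.Str.strip raw).toList "title".toList (by decide)
  have hart : (PySem.Str.startswith (PySem.Str.lower (PySem.Str.strip raw)) "artist:" = true)
      ↔ (':' ∈ (PySem.Str.strip raw).toList ∧
         PySem.Chars.lower (((PySem.Chars.splitOnMax (PySem.Str.strip raw).toList [':'] 1).headD [])) = "artist".toList) := by
    rw [show PySem.Str.startswith (PySem.Str.lower (PySem.Str.strip raw)) "artist:"
        = PySem.Chars.startswith (PySem.Chars.lower (PySem.Str.strip raw).toList) ("artist".toList ++ [':']) from by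
      simp only [PySem.Str.startswith, PySem.Str.toList_lower]
      congr 1]
    exact pv_key_iff (PySem.Str.strip raw).toList "artist".toList (by decide)
  by_cases hin : ':' ∈ (PySem.Str.strip raw).toList
  case neg =>
    have hnt : ¬ (PySem.Str.startswith (PySem.Str.lower (PySem.Str.strip raw)) "title:" = true) :=
      fun h => hin (htit.mp h).1
    have hna : ¬ (PySem.Str.startswith (PySem.Str.lower (PySem.Str.strip raw)) "artist:" = true) :=
      fun h => hin (hart.mp h).1
    have hni : ¬ (PySem.Str.isIn ":" (PySem.Str.strip raw) = true) := fun h => hin (hone.mp h)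
    rw [if_neg hnt, if_neg hna, if_neg hni]
    exact ⟨h1, h2⟩
  case pos =>
    rcases pv_colon_decomp _ hin with ⟨a, b, hL, ha⟩
    have hparts : (PySem.Str.splitMax? (PySem.Str.strip raw) ":" 1).getD []
        = [String.ofList a, String.ofList b] := by
      rw [show PySem.Str.splitMax? (PySem.Str.strip raw) ":" 1
          = (PySem.Chars.splitMax? (PySem.Str.strip raw).toList [':'] 1).map (List.map String.ofList) from rfl]
      rw [hL]
      rw [show PySem.Chars.splitMax? (a ++ ':' :: b) [':'] 1
          = some (PySem.Chars.splitOnMax (a ++ ':' :: b) [':'] 1) from by simp [PySem.Chars.splitMax?]]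
      rw [pv_split1_colon a b ha]
      rfl
    have hhead : ((PySem.Chars.splitOnMax (PySem.Str.strip raw).toList [':'] 1).headD []) = a := by
      rw [hL, pv_split1_colon a b ha]; rfl
    have hkey : PySem.Str.lower ((PySem.List.pyGet? ((PySem.Str.splitMax? (PySem.Str.strip raw) ":" 1).getD []) 0).getD "")
        = String.ofList (PySem.Chars.lower a) := by
      rw [hparts]
      simp [PySem.List.pyGet?, PySem.List.pyIdx?, PySem.Str.lower, String.toList_ofList]
    have hval : ((PySem.List.pyGet? ((PySem.Str.splitMax? (PySem.Str.strip raw) ":" 1).getD []) 1).getD "")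
        = String.ofList b := by
      rw [hparts]; simp [PySem.List.pyGet?, PySem.List.pyIdx?]
    rw [if_pos (hone.mpr hin)]
    by_cases ht : PySem.Chars.lower a = ("title" : String).toList
    · have hkt : PySem.Str.lower ((PySem.List.pyGet? ((PySem.Str.splitMax? (PySem.Str.strip raw) ":" 1).getD []) 0).getD "")
          = "title" := by rw [hkey, ht, String.ofList_toList]
      rw [if_pos (htit.mpr ⟨hin, by rw [hhead]; exact ht⟩)]
      rw [hkt]
      constructor
      · rw [PySem.Dict.get?_insert_self]
        simp [pvNorm]
      · rw [PySem.Dict.get?_insert_of_ne _ _ (by decide : ("artist" : String) ≠ "title")]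
        exact h2
    · have hnt : ¬ (PySem.Str.startswith (PySem.Str.lower (PySem.Str.strip raw)) "title:" = true) := by
        intro h
        exact ht (by rw [← hhead]; exact (htit.mp h).2)
      rw [if_neg hnt]
      by_cases har : PySem.Chars.lower a = ("artist" : String).toList
      · have hka : PySem.Str.lower ((PySem.List.pyGet? ((PySem.Str.splitMax? (PySem.Str.strip raw) ":" 1).getD []) 0).getD "")
            = "artist" := by rw [hkey, har, String.ofList_toList]
        rw [if_pos (hart.mpr ⟨hin, by rw [hhead]; exact har⟩)]
        rw [hka]
        constructor
        · rw [PySem.Dict.get?_insert_of_ne _ _ (by decide : ("title" : String) ≠ "artist")]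
          exact h1
        · rw [PySem.Dict.get?_insert_self]
          simp [pvNorm]
      · have hna : ¬ (PySem.Str.startswith (PySem.Str.lower (PySem.Str.strip raw)) "artist:" = true) := by
          intro h
          exact har (by rw [← hhead]; exact (hart.mp h).2)
        rw [if_neg hna, hkey]
        have hne1 : ("title" : String) ≠ String.ofList (PySem.Chars.lower a) := by
          intro h
          have h' := congrArg String.toList h
          rw [show (String.ofList (PySem.Chars.lower a)).toList = PySem.Chars.lower a from
            String.toList_ofList] at h'
          exact ht h'.symm
        have hne2 : ("artist" : String) ≠ String.ofList (PySem.Chars.lower a) := by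
          intro h
          have h' := congrArg String.toList h
          rw [show (String.ofList (PySem.Chars.lower a)).toList = PySem.Chars.lower a from
            String.toList_ofList] at h'
          exact har h'.symm
        rw [PySem.Dict.get?_insert_of_ne _ _ hne1, PySem.Dict.get?_insert_of_ne _ _ hne2]
        exact ⟨h1, h2⟩

theorem pv_inv (ls : List String) : ∀ (st : Option String × Option String) (d : PySem.Dict String String),
    st.1 = pvNorm (d.get? "title") → st.2 = pvNorm (d.get? "artist") →
    (ls.foldl pvLineStepA st).1 = pvNorm ((ls.foldl pvIngest d).get? "title")
      ∧ (ls.foldl pvLineStepA st).2 = pvNorm ((ls.foldl pvIngest d).get? "artist") := by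
  induction ls with
  | nil => intro st d h1 h2; exact ⟨h1, h2⟩
  | cons x t ih =>
    intro st d h1 h2
    have h := pv_step st d x h1 h2
    simp only [List.foldl_cons]
    exact ih (pvLineStepA st x) (pvIngest d x) h.1 h.2

-- ===== VERDICT (by name: the statement is the Claim_ definition above) =====
theorem parse_meta_section_py_spec : Claim_equal_parse_meta_section_py := by
  intro meta_text _
  have h := pv_inv ((PySem.Str.split? meta_text "\n").getD []) (none, none) PySem.Dict.empty rfl rfl
  unfold Spec_parse_meta_section_py parse_meta_section_py parse_meta_section_py_alt
  show [("title", (((PySem.Str.split? meta_text "\n").getD []).foldl pvLineStepA (none, none)).1),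
        ("artist", (((PySem.Str.split? meta_text "\n").getD []).foldl pvLineStepA (none, none)).2)]
      = [("title", pvNorm ((((PySem.Str.split? meta_text "\n").getD []).foldl pvIngest PySem.Dict.empty).get? "title")),
         ("artist", pvNorm ((((PySem.Str.split? meta_text "\n").getD []).foldl pvIngest PySem.Dict.empty).get? "artist"))]
  rw [h.1, h.2]
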